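-- pv_equiv track=rewrite | github.com/20it085/pycharm | Manyconfig.py | cal_path
-- ===== SOURCE A (Python) =====
-- def find_pos(keyboard, char):
--     for r, ROW in enumerate(keyboard):
--         for c, k in enumerate(ROW):
--             if k == char:
--                 return (r, c)
--     return None
--
-- def compute_mov(start, target):
--     sr, sc = start
--     tr, tc = target
--     ver_mov = tr - sr
--     hori_mov = tc - sc
--
--     move_ins = ''
--     if ver_mov > 0:
--         move_ins += 'd' * ver_mov
--     elif ver_mov < 0:
--         move_ins += 'u' * -ver_mov
--
--     if hori_mov > 0:
--         move_ins += 'r' * hori_mov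
--     elif hori_mov < 0:
--         move_ins += 'l' * -hori_mov
--
--     return move_ins
--
-- def cal_path(keyboard, input_string):
--     start = (0, 0)  # Starting at the top-left corner
--     path = ''
--
--     for char in input_string:
--         pos = find_pos(keyboard, char)
--         if pos is None:
--             return None
--
--         path += compute_mov(start, pos) + 'p'
--         start = pos
--
--     return path
-- ===== SOURCE B (Python) =====
-- def cal_path(keyboard, input_string):
--     # Phase 0: index every key by its first (row, col) occurrence, once.
--     index = {}
--     for r, row in enumerate(keyboard):
--         for c, k in enumerate(row):
--             if k not in index:
--                 index[k] = (r, c)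
--     # Phase 1: materialize the target coordinate of every input char.
--     targets = []
--     for ch in input_string:
--         if ch not in index:
--             return None
--         targets.append(index[ch])
--     # Phase 2: pairwise diffs from (0,0) through the targets.
--     pieces = []
--     prev = (0, 0)
--     for (r, c) in targets:
--         dr = r - prev[0]
--         dc = c - prev[1]
--         pieces.append(('d' * dr if dr > 0 else 'u' * -dr if dr < 0 else '')
--                       + ('r' * dc if dc > 0 else 'l' * -dc if dc < 0 else '')
--                       + 'p')
--         prev = (r, c)
--     return ''.join(pieces)
-- ===== Notes on version B (the rewrite author's own statement) =====
-- stated objective: alternative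
-- what changed: Replaces A's single interleaved loop (scan keyboard per char, running start) by three phases: build a first-occurrence position dict once, materialize all target coordinates (None early on a missing char), then emit pairwise moves from (0,0) and join.
import Mathlib
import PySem

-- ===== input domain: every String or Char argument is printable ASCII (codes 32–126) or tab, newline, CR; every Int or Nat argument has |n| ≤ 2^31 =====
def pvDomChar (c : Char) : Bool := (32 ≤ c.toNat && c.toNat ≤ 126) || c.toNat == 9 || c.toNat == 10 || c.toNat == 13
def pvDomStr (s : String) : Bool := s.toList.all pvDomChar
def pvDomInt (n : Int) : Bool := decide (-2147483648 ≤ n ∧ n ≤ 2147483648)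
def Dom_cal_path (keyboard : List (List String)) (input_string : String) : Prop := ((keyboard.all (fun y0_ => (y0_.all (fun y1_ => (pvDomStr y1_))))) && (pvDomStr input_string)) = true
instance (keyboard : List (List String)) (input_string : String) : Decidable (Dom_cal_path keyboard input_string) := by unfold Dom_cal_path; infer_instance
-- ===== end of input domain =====

-- B replaces A's interleaved scan-per-char loop by: build a first-occurrence
-- position index once, materialize all target coordinates (None early if a char
-- is missing), then emit pairwise moves from (0,0) and join. Objective: alternative.

-- ===== PORT A =====
-- inner 'for c, k in enumerate(ROW)' of find_pos
def findPosRow (row : List String) (char : String) (c : Int) : Option Int :=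
  match row with
  | [] => none
  | k :: rest => if k == char then some c else findPosRow rest char (c + 1)

-- outer 'for r, ROW in enumerate(keyboard)' of find_pos
def findPosAux (keyboard : List (List String)) (char : String) (r : Int) : Option (Int × Int) :=
  match keyboard with
  | [] => none
  | row :: rest =>
    match findPosRow row char 0 with
    | some c => some (r, c)
    | none => findPosAux rest char (r + 1)

def find_pos (keyboard : List (List String)) (char : String) : Option (Int × Int) :=
  findPosAux keyboard char 0

def compute_mov (start target : Int × Int) : String :=
  let ver_mov : Int := target.1 - start.1
  let hori_mov : Int := target.2 - start.2
  let move_ins : String := ""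
  let move_ins := if ver_mov > 0 then move_ins ++ String.mk (List.replicate ver_mov.toNat 'd')
                  else if ver_mov < 0 then move_ins ++ String.mk (List.replicate (-ver_mov).toNat 'u')
                  else move_ins
  let move_ins := if hori_mov > 0 then move_ins ++ String.mk (List.replicate hori_mov.toNat 'r')
                  else if hori_mov < 0 then move_ins ++ String.mk (List.replicate (-hori_mov).toNat 'l')
                  else move_ins
  move_ins

-- 'for char in input_string' with running (start, path)
def calPathLoop (keyboard : List (List String)) (chars : List Char)
    (start : Int × Int) (path : String) : Option String :=
  match chars with
  | [] => some path
  | ch :: rest =>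
    match find_pos keyboard (String.mk [ch]) with
    | none => none
    | some pos => calPathLoop keyboard rest pos (path ++ compute_mov start pos ++ "p")

def cal_path (keyboard : List (List String)) (input_string : String) : Option String :=
  calPathLoop keyboard input_string.toList (0, 0) ""

-- ===== PORT B =====
-- phase 0 inner loop: 'if k not in index: index[k] = (r, c)'
def bIdxRow (row : List String) (r c : Int) (d : PySem.Dict String (Int × Int)) :
    PySem.Dict String (Int × Int) :=
  match row with
  | [] => d
  | k :: rest => bIdxRow rest r (c + 1) (if d.contains k then d else d.insert k (r, c))

-- phase 0 outer loop over rows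
def bIdx (rows : List (List String)) (r : Int) (d : PySem.Dict String (Int × Int)) :
    PySem.Dict String (Int × Int) :=
  match rows with
  | [] => d
  | row :: rest => bIdx rest (r + 1) (bIdxRow row r 0 d)

-- phase 1: targets, None early if a char is missing
def bTargets (idx : PySem.Dict String (Int × Int)) (chars : List Char) :
    Option (List (Int × Int)) :=
  match chars with
  | [] => some []
  | ch :: rest =>
    match idx.get? (String.mk [ch]) with
    | none => none
    | some p => (bTargets idx rest).map (fun ts => p :: ts)

-- one piece: vertical moves, horizontal moves, 'p'
def bPiece (prev t : Int × Int) : String :=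
  let dr := t.1 - prev.1
  let dc := t.2 - prev.2
  (if dr > 0 then String.mk (List.replicate dr.toNat 'd')
   else if dr < 0 then String.mk (List.replicate (-dr).toNat 'u') else "")
  ++ (if dc > 0 then String.mk (List.replicate dc.toNat 'r')
      else if dc < 0 then String.mk (List.replicate (-dc).toNat 'l') else "")
  ++ "p"

-- phase 2: pairwise pieces from prev through the targets
def bPieces (prev : Int × Int) (targets : List (Int × Int)) : List String :=
  match targets with
  | [] => []
  | t :: rest => bPiece prev t :: bPieces t rest

def cal_path_alt (keyboard : List (List String)) (input_string : String) : Option String :=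
  let idx := bIdx keyboard 0 PySem.Dict.empty
  match bTargets idx input_string.toList with
  | none => none
  | some ts => some (String.join (bPieces (0, 0) ts))

-- ===== PRECONDITION & SPEC =====
def Spec_cal_path (keyboard : List (List String)) (input_string : String) (out : Option String) : Prop := out = cal_path_alt keyboard input_string
instance (keyboard : List (List String)) (input_string : String) (out : Option String) : Decidable (Spec_cal_path keyboard input_string out) := by unfold Spec_cal_path; infer_instance

-- ===== CLAIM (what is proved, stated in full; the proofs are below) =====
def Claim_equal_cal_path : Prop := ∀ (keyboard : List (List String)) (input_string : String), Dom_cal_path keyboard input_string → Spec_cal_path keyboard input_string (cal_path keyboard input_string)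

-- ===== LEMMAS AND PROOFS =====

-- the index's row loop: lookup = old lookup, else first match in the row
theorem bIdxRow_get? (row : List String) (r c : Int) (d : PySem.Dict String (Int × Int))
    (s : String) :
    (bIdxRow row r c d).get? s =
      ((d.get? s).orElse (fun _ => (findPosRow row s c).map (fun cc => (r, cc)))) := by
  induction row generalizing c d with
  | nil => simp [bIdxRow, findPosRow]
  | cons k rest ih =>
    simp only [bIdxRow, findPosRow, ih]
    by_cases hk : k = s
    · subst hk
      by_cases hc : d.contains k = true
      · obtain ⟨v, hv⟩ := Option.isSome_iff_exists.mp
          (show (d.get? k).isSome by rw [← PySem.Dict.contains_eq_isSome_get?]; exact hc)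
        simp [hc, hv, Option.orElse]
      · have hn : d.get? k = none := by
          rw [← Option.not_isSome_iff_eq_none, ← PySem.Dict.contains_eq_isSome_get?]
          simp [hc]
        simp [hc, hn, PySem.Dict.get?_insert_self, Option.orElse]
    · have hne : s ≠ k := fun h => hk h.symm
      by_cases hc : d.contains k = true
      · simp [hc, beq_iff_eq, hk]
      · simp [hc, PySem.Dict.get?_insert_of_ne d (r, c) hne, beq_iff_eq, hk]

theorem bIdx_get? (rows : List (List String)) (r : Int)
    (d : PySem.Dict String (Int × Int)) (s : String) :
    (bIdx rows r d).get? s = ((d.get? s).orElse (fun _ => findPosAux rows s r)) := by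
  induction rows generalizing r d with
  | nil => simp [bIdx, findPosAux]
  | cons row rest ih =>
    simp only [bIdx, findPosAux, ih, bIdxRow_get?]
    cases d.get? s with
    | some v => simp [Option.orElse]
    | none =>
      cases findPosRow row s 0 with
      | some c => simp [Option.orElse]
      | none => simp [Option.orElse]

theorem idx_eq_find_pos (keyboard : List (List String)) (s : String) :
    (bIdx keyboard 0 PySem.Dict.empty).get? s = find_pos keyboard s := by
  rw [bIdx_get?, find_pos]
  simp [Option.orElse]

theorem bPiece_eq (prev t : Int × Int) : bPiece prev t = compute_mov prev t ++ "p" := by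
  simp only [bPiece, compute_mov]
  split_ifs <;> simp_all [String.append_assoc]

theorem foldl_append_init (l : List String) (init : String) :
    l.foldl (fun r s => r ++ s) init = init ++ l.foldl (fun r s => r ++ s) "" := by
  induction l generalizing init with
  | nil => simp
  | cons a l ih =>
    rw [List.foldl_cons, List.foldl_cons, ih, ih ("" ++ a)]
    simp [String.append_assoc]

theorem calPathLoop_eq (keyboard : List (List String)) (chars : List Char)
    (prev : Int × Int) (path : String) :
    calPathLoop keyboard chars prev path =
      (bTargets (bIdx keyboard 0 PySem.Dict.empty) chars).map
        (fun ts => path ++ String.join (bPieces prev ts)) := by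
  induction chars generalizing prev path with
  | nil => simp [calPathLoop, bTargets, bPieces, String.join]
  | cons ch rest ih =>
    simp only [calPathLoop, bTargets, idx_eq_find_pos]
    cases h : find_pos keyboard (String.mk [ch]) with
    | none => simp
    | some pos =>
      dsimp only
      rw [ih]
      cases bTargets (bIdx keyboard 0 PySem.Dict.empty) rest with
      | none => simp
      | some ts =>
        simp only [Option.map_some]
        congr 1
        simp only [String.join, bPieces, bPiece_eq, List.foldl_cons]
        rw [foldl_append_init (bPieces pos ts) ("" ++ (compute_mov prev pos ++ "p"))]
        simp [String.append_assoc]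

-- ===== VERDICT (by name: the statement is the Claim_ definition above) =====
theorem cal_path_spec : Claim_equal_cal_path := by
  intro keyboard input_string _
  unfold Spec_cal_path cal_path
  rw [calPathLoop_eq]
  cases h : bTargets (bIdx keyboard 0 PySem.Dict.empty) input_string.toList with
  | none => simp [cal_path_alt, h]
  | some ts => simp [cal_path_alt, h]
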